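-- pv_equiv track=rewrite | github.com/Huanqing-Mao/web-scraping | src/utils/remove_space.py | remove_leading_space
-- ===== SOURCE A (Python) =====
-- def remove_leading_space(content):
--     """
--     Remove leading spaces after newline characters.
--
--     Args:
--         content: String content to process
--
--     Returns:
--         String with leading spaces after newlines removed
--     """
--     if not isinstance(content, str):
--         return content
--
--     text = ""
--     for i in range(1, len(content)):
--         prev = content[i - 1]
--         if prev == "\n":
--             continue
--         else:
--             text += content[i]
--     text = content[0] + text
--     return text
-- ===== SOURCE B (Python) =====
-- import re
--
--
-- def remove_leading_space(content):
--     """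
--     Remove leading spaces after newline characters.
--
--     Args:
--         content: String content to process
--
--     Returns:
--         String with leading spaces after newlines removed
--     """
--     if not isinstance(content, str):
--         return content
--     # A single regex substitution: delete every character that is preceded
--     # (in the original string) by a newline.  DOTALL lets '.' match '\n'
--     # itself, so a newline right after a newline is deleted too.
--     return re.sub(r'(?<=\n).', '', content, flags=re.DOTALL)
-- ===== Notes on version B (the rewrite author's own statement) =====
-- stated objective: idiomatic
-- what changed: A's index loop over range(1, len(content)) with content[i-1] lookups, repeated string concatenation and a prepended content[0] is replaced by a single regex substitution re.sub(r'(?<=\n).', '', content, flags=re.DOTALL), a zero-width lookbehind deleting the character after each original newline; Pre_ excludes only the empty string, where A raises IndexError at content[0] and B returns ''.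
-- outside the precondition, e.g. on remove_leading_space(''): A raises IndexError, B returns ''
import Mathlib
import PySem

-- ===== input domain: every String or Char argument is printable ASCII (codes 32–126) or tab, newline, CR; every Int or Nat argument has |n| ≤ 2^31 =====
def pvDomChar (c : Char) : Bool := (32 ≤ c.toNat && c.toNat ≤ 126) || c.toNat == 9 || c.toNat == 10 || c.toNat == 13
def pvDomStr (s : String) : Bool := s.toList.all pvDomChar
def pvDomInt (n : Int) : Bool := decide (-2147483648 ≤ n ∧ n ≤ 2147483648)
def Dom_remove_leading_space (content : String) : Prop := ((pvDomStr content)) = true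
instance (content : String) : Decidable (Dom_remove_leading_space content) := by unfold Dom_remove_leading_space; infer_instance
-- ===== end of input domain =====

-- B replaces A's index loop by one regex substitution re.sub(r'(?<=\n).', '', s, re.DOTALL);
-- on the empty string A raises IndexError while B returns "" (Pre_ excludes it).

-- ===== PORT A =====
-- literal port: text = "" ; for i in range(1, len(content)): prev = content[i-1];
-- if prev == "\n": continue else: text += content[i] ; return content[0] + text
def remove_leading_space (content : String) : String :=
  let cs := content.toList
  let text := (PySem.List.pyRange 1 (cs.length : Int) 1).foldl
    (fun text i =>
      let prev := PySem.List.pyGetD cs (i - 1) ' '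
      if prev = '\n' then text else text ++ [PySem.List.pyGetD cs i ' '])
    ([] : List Char)
  String.mk (PySem.List.pyGetD cs 0 ' ' :: text)

-- ===== PORT B =====
-- Hand port of re.sub(r'(?<=\n).', '', content, flags=re.DOTALL): the engine scans left to
-- right; at each position the zero-width lookbehind inspects the ORIGINAL previous character;
-- a match consumes exactly one character and emits nothing, a failure emits the character and
-- both advance by one.  pvReSubAfterNl carries that original previous character; exact for
-- this pattern on every string.
def pvReSubAfterNl : Option Char → List Char → List Char
  | _, [] => []
  | prev, c :: rest =>
    if prev = some '\n' then pvReSubAfterNl (some c) rest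
    else c :: pvReSubAfterNl (some c) rest

def remove_leading_space_alt (content : String) : String :=
  String.mk (pvReSubAfterNl none content.toList)

-- ===== PRECONDITION & SPEC =====
-- Pre_ excludes only the empty string, on which Python A raises IndexError at content[0]
-- (B's regex substitution returns "" there).
def Pre_remove_leading_space (content : String) : Prop := content ≠ ""
instance (content : String) : Decidable (Pre_remove_leading_space content) := by
  unfold Pre_remove_leading_space; infer_instance
def pvWitness_remove_leading_space : String := "a\n b"

def Spec_remove_leading_space (content : String) (out : String) : Prop :=
  out = remove_leading_space_alt content
instance (content : String) (out : String) : Decidable (Spec_remove_leading_space content out) := by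
  unfold Spec_remove_leading_space; infer_instance

-- ===== CLAIM (what is proved, stated in full; the proofs are below) =====
def Claim_equal_remove_leading_space : Prop := ∀ (content : String), Dom_remove_leading_space content → Pre_remove_leading_space content → Spec_remove_leading_space content (remove_leading_space content)

-- ===== LEMMAS AND PROOFS =====

-- xs[i] on a cons for a positive index reads the tail at i-1
theorem pvGetD_cons_pos (x : Char) (xs : List Char) (i : Int) (h : 1 ≤ i) :
    PySem.List.pyGetD (x :: xs) i ' ' = PySem.List.pyGetD xs (i - 1) ' ' := by
  obtain ⟨n, rfl⟩ := Int.eq_ofNat_of_zero_le (by omega : (0:Int) ≤ i)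
  have hn : 1 ≤ n := by exact_mod_cast h
  have h1 : ((n : Int) - 1) = ((n - 1 : Nat) : Int) := by omega
  rw [h1, PySem.List.pyGetD_natCast, PySem.List.pyGetD_natCast]
  obtain ⟨m, rfl⟩ := Nat.exists_eq_add_of_le hn
  rw [Nat.add_comm]
  simp [List.getD]

-- range(2, n+1) is range(1, n) shifted by one
theorem pvRange_shift (n : Nat) :
    PySem.List.pyRange 2 ((n : Int) + 1) 1 = (PySem.List.pyRange 1 (n : Int) 1).map (· + 1) := by
  rw [PySem.List.pyRange_one, PySem.List.pyRange_one, List.map_map]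
  have h : ((n : Int) + 1 - 2).toNat = ((n : Int) - 1).toNat := by omega
  rw [h]
  apply List.map_congr_left
  intro k _
  simp; ring

-- A's loop body in `foldl_append_if` shape, then closed to a filter/map over the index range
theorem pvLoopA (cs : List Char) :
    (PySem.List.pyRange 1 (cs.length : Int) 1).foldl
      (fun text i =>
        let prev := PySem.List.pyGetD cs (i - 1) ' '
        if prev = '\n' then text else text ++ [PySem.List.pyGetD cs i ' '])
      ([] : List Char)
    = ((PySem.List.pyRange 1 (cs.length : Int) 1).filter
        (fun i => !(PySem.List.pyGetD cs (i - 1) ' ' == '\n'))).map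
        (fun i => PySem.List.pyGetD cs i ' ') := by
  rw [PySem.List.foldl_congr_mem _ _
    (fun text i => if (!(PySem.List.pyGetD cs (i - 1) ' ' == '\n')) then
        text ++ [PySem.List.pyGetD cs i ' '] else text) _
    (by intro acc x _; by_cases h : PySem.List.pyGetD cs (x - 1) ' ' = '\n' <;> simp [h])]
  rw [PySem.List.foldl_append_if]
  simp

-- the filtered index scan equals a pairwise zip filter over (string, its tail)
theorem pvKey : ∀ (cs : List Char),
    ((PySem.List.pyRange 1 (cs.length : Int) 1).filter
        (fun i => !(PySem.List.pyGetD cs (i - 1) ' ' == '\n'))).map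
        (fun i => PySem.List.pyGetD cs i ' ')
    = (cs.zip cs.tail).filterMap (fun pc => if pc.1 ≠ '\n' then some pc.2 else none)
  | [] => by simp [PySem.List.pyRange_one_eq_nil]
  | [c] => by simp [PySem.List.pyRange_one_eq_nil]
  | p :: c :: rest => by
    have hlen : ((p :: c :: rest).length : Int) = ((c :: rest).length : Int) + 1 := by
      push_cast [List.length_cons]; ring
    have hpos : (1 : Int) < ((c :: rest).length : Int) + 1 := by
      have : 0 < (c :: rest).length := Nat.succ_pos _
      omega
    have hhead : PySem.List.pyGetD (p :: c :: rest) (1 - 1) ' ' = p := by norm_num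
    have hone : PySem.List.pyGetD (p :: c :: rest) 1 ' ' = c := by
      rw [pvGetD_cons_pos _ _ _ (by norm_num)]; norm_num
    have hfilter : (PySem.List.pyRange 1 ((c :: rest).length : Int) 1).filter
        ((fun i => !(PySem.List.pyGetD (p :: c :: rest) (i - 1) ' ' == '\n')) ∘ (· + 1))
        = (PySem.List.pyRange 1 ((c :: rest).length : Int) 1).filter
        (fun i => !(PySem.List.pyGetD (c :: rest) (i - 1) ' ' == '\n')) := by
      apply List.filter_congr
      intro i hi
      have h1 : 1 ≤ i := (PySem.List.mem_pyRange_one.mp hi).1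
      simp only [Function.comp]
      rw [show i + 1 - 1 = i by ring, pvGetD_cons_pos _ _ _ h1]
    have hmap : ((PySem.List.pyRange 1 ((c :: rest).length : Int) 1).filter
          (fun i => !(PySem.List.pyGetD (c :: rest) (i - 1) ' ' == '\n'))).map
          ((fun i => PySem.List.pyGetD (p :: c :: rest) i ' ') ∘ (· + 1))
        = ((PySem.List.pyRange 1 ((c :: rest).length : Int) 1).filter
          (fun i => !(PySem.List.pyGetD (c :: rest) (i - 1) ' ' == '\n'))).map
          (fun i => PySem.List.pyGetD (c :: rest) i ' ') := by
      apply List.map_congr_left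
      intro i hi
      have h1 : 1 ≤ i := (PySem.List.mem_pyRange_one.mp (List.mem_of_mem_filter hi)).1
      simp only [Function.comp]
      rw [pvGetD_cons_pos _ _ _ (by omega)]
      norm_num
    have ih := pvKey (c :: rest)
    rw [hlen, PySem.List.pyRange_one_cons hpos,
        show (1 : Int) + 1 = 2 by norm_num, pvRange_shift,
        List.filter_cons, List.filter_map, hfilter, hhead]
    by_cases hp : p = '\n'
    · simp only [hp, List.zip_cons_cons, List.tail_cons, List.filterMap_cons, beq_self_eq_true,
        Bool.not_true, Bool.false_eq_true, if_false, ite_not] at *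
      rw [List.map_map, hmap, ih]
      simp
    · simp only [List.zip_cons_cons, List.tail_cons, List.filterMap_cons, if_pos hp,
        (by simp [hp] : (!(p == '\n')) = true), if_true, List.map_cons, hone, List.map_map]
      rw [hmap, ih]
      simp

-- B's regex scanner, run with a known previous character, is that zip filter
theorem pvSub_eq : ∀ (p : Char) (cs : List Char),
    pvReSubAfterNl (some p) cs
    = ((p :: cs).zip cs).filterMap (fun pc => if pc.1 ≠ '\n' then some pc.2 else none)
  | _, [] => by simp [pvReSubAfterNl]
  | p, c :: rest => by
    rw [pvReSubAfterNl, List.zip_cons_cons, List.filterMap_cons, pvSub_eq c rest]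
    by_cases hp : p = '\n' <;> simp [hp]

-- ===== VERDICT (by name: the statement is the Claim_ definition above) =====
theorem pvMain : ∀ (cs : List Char), cs ≠ [] →
    String.mk (PySem.List.pyGetD cs 0 ' ' ::
      (PySem.List.pyRange 1 (cs.length : Int) 1).foldl
        (fun text i =>
          let prev := PySem.List.pyGetD cs (i - 1) ' '
          if prev = '\n' then text else text ++ [PySem.List.pyGetD cs i ' '])
        ([] : List Char))
    = String.mk (pvReSubAfterNl none cs)
  | [], h => absurd rfl h
  | c :: rest, _ => by
    rw [pvLoopA, pvKey, pvReSubAfterNl]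
    simp [pvSub_eq, PySem.List.pyGetD]

theorem remove_leading_space_spec : Claim_equal_remove_leading_space := by
  intro content _ hpre
  unfold Spec_remove_leading_space remove_leading_space remove_leading_space_alt
  exact pvMain content.toList (fun h => hpre (String.toList_eq_nil_iff.mp h))
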